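-- pv_equiv track=rewrite | github.com/diazbetancur/Gandarias-Agent | agenda.py | _bucket_minutes_after_merge
-- ===== SOURCE A (Python) =====
-- def _bucket_minutes_after_merge(bucket_intervals, key, seg_s, seg_e):
--     """
--     Simula añadir [seg_s, seg_e) al bucket 'key' y devuelve la
--     duración total coalescida en minutos del bucket resultante.
--     """
--     ivs = bucket_intervals.get(key, []) + [(seg_s, seg_e)]
--     ivs.sort()
--     merged = []
--     for s, e in ivs:
--         if not merged or s > merged[-1][1]:
--             merged.append([s, e])
--         else:
--             merged[-1][1] = max(merged[-1][1], e)
--     return sum(b - a for a, b in merged), [(a, b) for a, b in merged]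
-- ===== SOURCE B (Python) =====
-- def _bucket_minutes_after_merge(bucket_intervals, key, seg_s, seg_e):
--     ivs = sorted(bucket_intervals.get(key, []) + [(seg_s, seg_e)])
--     # Coalesce right-to-left: each interval absorbs the blocks it reaches,
--     # keeping the running total fused into the same pass (no second sum pass).
--     rev = []            # coalesced blocks, stored right-to-left (rev[-1] is the leftmost block)
--     total = 0
--     for s, e in reversed(ivs):
--         while rev and rev[-1][0] <= e:
--             s2, e2 = rev.pop()
--             total -= e2 - s2
--             if e2 > e:
--                 e = e2
--         rev.append((s, e))
--         total += e - s
--     return total, rev[::-1]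
-- ===== Notes on version B (the rewrite author's own statement) =====
-- stated objective: alternative
-- what changed: B replaces A's left-to-right append-and-mutate-last merge followed by a separate summation pass with a single right-to-left pass in which each interval absorbs the already-coalesced blocks it reaches and the running total is updated incrementally on every push/pop.
import Mathlib
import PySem

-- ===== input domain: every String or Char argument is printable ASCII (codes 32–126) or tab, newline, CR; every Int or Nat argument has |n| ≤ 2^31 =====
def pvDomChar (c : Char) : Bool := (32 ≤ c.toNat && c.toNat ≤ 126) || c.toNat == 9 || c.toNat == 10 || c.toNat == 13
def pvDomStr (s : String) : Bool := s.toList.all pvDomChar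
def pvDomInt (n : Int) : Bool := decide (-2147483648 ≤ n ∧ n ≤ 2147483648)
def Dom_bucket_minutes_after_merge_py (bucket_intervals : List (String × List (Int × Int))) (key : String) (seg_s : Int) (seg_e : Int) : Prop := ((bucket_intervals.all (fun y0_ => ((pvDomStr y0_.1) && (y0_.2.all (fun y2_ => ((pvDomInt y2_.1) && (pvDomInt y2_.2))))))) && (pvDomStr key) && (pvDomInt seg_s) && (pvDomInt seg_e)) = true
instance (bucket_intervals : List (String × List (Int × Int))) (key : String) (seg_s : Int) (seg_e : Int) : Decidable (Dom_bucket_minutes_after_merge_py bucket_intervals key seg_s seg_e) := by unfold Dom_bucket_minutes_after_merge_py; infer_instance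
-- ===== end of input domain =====

-- B coalesces right-to-left in one pass with the running total fused in (alternative
-- decomposition, same cost); equivalence of the return values is proved for all inputs.

-- ===== PORT A =====
-- one loop iteration of A: append a new block or grow the last block's end
def aStep (merged : List (Int × Int)) (iv : Int × Int) : List (Int × Int) :=
  match merged.getLast? with
  | none => merged ++ [iv]
  | some (a, b) => if iv.1 > b then merged ++ [iv] else merged.dropLast ++ [(a, max b iv.2)]

def bucket_minutes_after_merge_py (bucket_intervals : List (String × List (Int × Int))) (key : String) (seg_s : Int) (seg_e : Int) : Int × (List (Int × Int)) :=
  let ivs := PySem.List.sorted2 (PySem.Dict.getD ⟨bucket_intervals⟩ key [] ++ [(seg_s, seg_e)]) (fun p => p.1) (fun p => p.2)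
  let merged := ivs.foldl aStep []
  (merged.foldl (fun acc p => acc + (p.2 - p.1)) 0, merged.map (fun p => (p.1, p.2)))

-- ===== PORT B =====
-- B's inner while-loop: Python's `rev` is kept head-first here (Python's rev[-1] is the
-- Lean head, rev.pop()/rev.append() are tail/cons, and the final rev[::-1] is the list itself)
def bAbsorb (e total : Int) (rev : List (Int × Int)) : Int × Int × List (Int × Int) :=
  match rev with
  | [] => (e, total, [])
  | (s2, e2) :: t =>
      if s2 ≤ e then bAbsorb (if e2 > e then e2 else e) (total - (e2 - s2)) t
      else (e, total, (s2, e2) :: t)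

-- one iteration of B's for-loop over reversed(ivs)
def bStep (st : Int × List (Int × Int)) (iv : Int × Int) : Int × List (Int × Int) :=
  let (e', total', rest) := bAbsorb iv.2 st.1 st.2
  (total' + (e' - iv.1), (iv.1, e') :: rest)

def bucket_minutes_after_merge_py_alt (bucket_intervals : List (String × List (Int × Int))) (key : String) (seg_s : Int) (seg_e : Int) : Int × (List (Int × Int)) :=
  let ivs := PySem.List.sorted2 (PySem.Dict.getD ⟨bucket_intervals⟩ key [] ++ [(seg_s, seg_e)]) (fun p => p.1) (fun p => p.2)
  let st := ivs.reverse.foldl bStep (0, [])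
  (st.1, st.2)

-- ===== PRECONDITION & SPEC =====
def Spec_bucket_minutes_after_merge_py (bucket_intervals : List (String × List (Int × Int))) (key : String) (seg_s : Int) (seg_e : Int) (out : Int × (List (Int × Int))) : Prop := out = bucket_minutes_after_merge_py_alt bucket_intervals key seg_s seg_e
instance (bucket_intervals : List (String × List (Int × Int))) (key : String) (seg_s : Int) (seg_e : Int) (out : Int × (List (Int × Int))) : Decidable (Spec_bucket_minutes_after_merge_py bucket_intervals key seg_s seg_e out) := by unfold Spec_bucket_minutes_after_merge_py; infer_instance

-- ===== CLAIM (what is proved, stated in full; the proofs are below) =====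
def Claim_equal_bucket_minutes_after_merge_py : Prop := ∀ (bucket_intervals : List (String × List (Int × Int))) (key : String) (seg_s : Int) (seg_e : Int), Dom_bucket_minutes_after_merge_py bucket_intervals key seg_s seg_e → Spec_bucket_minutes_after_merge_py bucket_intervals key seg_s seg_e (bucket_minutes_after_merge_py bucket_intervals key seg_s seg_e)

-- ===== LEMMAS AND PROOFS =====

-- proof-side pure versions of the coalescing pass
def pAbsorb (e : Int) (N : List (Int × Int)) : Int × List (Int × Int) :=
  match N with
  | [] => (e, [])
  | (s2, e2) :: t => if s2 ≤ e then pAbsorb (max e e2) t else (e, (s2, e2) :: t)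

def mAbsorb (s e : Int) (N : List (Int × Int)) : List (Int × Int) :=
  match N with
  | [] => [(s, e)]
  | (s2, e2) :: t => if s2 ≤ e then mAbsorb s (max e e2) t else (s, e) :: (s2, e2) :: t

def mergeR (l : List (Int × Int)) : List (Int × Int) :=
  l.foldr (fun iv N => mAbsorb iv.1 iv.2 N) []

def sumlen (N : List (Int × Int)) : Int := N.foldr (fun p acc => (p.2 - p.1) + acc) 0

def SepIv (M : List (Int × Int)) : Prop := M.IsChain (fun b c => b.2 < c.1)

theorem aStep_nil (x : Int × Int) : aStep [] x = [x] := rfl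

theorem aStep_singleton (b x : Int × Int) :
    aStep [b] x = if x.1 > b.2 then [b, x] else [(b.1, max b.2 x.2)] := by
  simp [aStep]

theorem aStep_cons_cons (b c : Int × Int) (M : List (Int × Int)) (x : Int × Int) :
    aStep (b :: c :: M) x = b :: aStep (c :: M) x := by
  obtain ⟨a2, b2, h⟩ : ∃ a2 b2, (c :: M).getLast? = some (a2, b2) := by
    rcases hl : (c :: M).getLast? with _ | ⟨a2, b2⟩
    · simp at hl
    · exact ⟨a2, b2, rfl⟩
  simp [aStep, List.getLast?_cons_cons, h]
  split <;> simp

theorem aStep_head (M : List (Int × Int)) (c x : Int × Int) :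
    ∃ e tl, aStep (c :: M) x = (c.1, e) :: tl := by
  cases M with
  | nil =>
      rw [aStep_singleton]
      split
      · exact ⟨c.2, [x], rfl⟩
      · exact ⟨max c.2 x.2, [], rfl⟩
  | cons d M' => exact ⟨c.2, aStep (d :: M') x, by rw [aStep_cons_cons]⟩

theorem sepIv_step (M : List (Int × Int)) (x : Int × Int) (h : SepIv M) : SepIv (aStep M x) := by
  induction M with
  | nil => simp [SepIv, aStep_nil]
  | cons b M IH =>
      cases M with
      | nil =>
          rw [aStep_singleton]
          split
          · exact List.isChain_pair.mpr (by omega)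
          · simp [SepIv]
      | cons c M' =>
          rw [aStep_cons_cons]
          obtain ⟨hbc, hsep⟩ := List.isChain_cons_cons.mp h
          obtain ⟨e, tl, he⟩ := aStep_head M' c x
          have hs : SepIv (aStep (c :: M') x) := IH hsep
          rw [he] at hs ⊢
          exact List.isChain_cons_cons.mpr ⟨hbc, hs⟩

-- absorbing the blocks of an already separated list reproduces it
theorem foldr_mAbsorb_sep (M : List (Int × Int)) (h : SepIv M) :
    M.foldr (fun iv N => mAbsorb iv.1 iv.2 N) [] = M := by
  induction M with
  | nil => rfl
  | cons b M IH =>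
      cases M with
      | nil => rfl
      | cons c M' =>
          obtain ⟨hbc, hsep⟩ := List.isChain_cons_cons.mp h
          simp only [List.foldr_cons] at IH ⊢
          rw [IH hsep, mAbsorb]
          simp [not_le.mpr hbc]

theorem mAbsorb_mAbsorb (t : List (Int × Int)) (b1 b2 s e : Int) (h : s ≤ b2) :
    mAbsorb b1 b2 (mAbsorb s e t) = mAbsorb b1 (max b2 e) t := by
  induction t generalizing e with
  | nil => simp [mAbsorb, h]
  | cons p t IH =>
      obtain ⟨s2, e2⟩ := p
      by_cases h2 : s2 ≤ e
      · have h2' : s2 ≤ max b2 e := le_trans h2 (le_max_right _ _)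
        rw [mAbsorb, if_pos h2, IH, mAbsorb, if_pos h2', max_assoc]
      · rw [mAbsorb, if_neg h2, mAbsorb, if_pos h, mAbsorb]

theorem key_step (M : List (Int × Int)) (h : SepIv M) (x : Int × Int) (N : List (Int × Int)) :
    (aStep M x).foldr (fun iv N => mAbsorb iv.1 iv.2 N) N
      = M.foldr (fun iv N => mAbsorb iv.1 iv.2 N) (mAbsorb x.1 x.2 N) := by
  induction M generalizing N with
  | nil => simp [aStep_nil]
  | cons b M IH =>
      cases M with
      | nil =>
          rw [aStep_singleton]
          split
          · simp
          · rename_i hle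
            simp only [List.foldr_cons, List.foldr_nil]
            rw [mAbsorb_mAbsorb _ _ _ _ _ (by omega)]
      | cons c M' =>
          obtain ⟨hbc, hsep⟩ := List.isChain_cons_cons.mp h
          rw [aStep_cons_cons]
          simp only [List.foldr_cons]
          rw [IH hsep]
          rfl

-- A's left-to-right merge equals the right-to-left coalescing
theorem foldl_aStep_eq (l : List (Int × Int)) :
    ∀ M, SepIv M → l.foldl aStep M = M.foldr (fun iv N => mAbsorb iv.1 iv.2 N) (mergeR l) := by
  induction l with
  | nil => intro M h; simpa [mergeR] using (foldr_mAbsorb_sep M h).symm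
  | cons x l IH =>
      intro M h
      rw [List.foldl_cons, IH (aStep M x) (sepIv_step M x h), key_step M h x (mergeR l)]
      rfl

theorem pAbsorb_spec (N : List (Int × Int)) (s e : Int) :
    mAbsorb s e N = (s, (pAbsorb e N).1) :: (pAbsorb e N).2 := by
  induction N generalizing e with
  | nil => rfl
  | cons p t IH =>
      obtain ⟨s2, e2⟩ := p
      by_cases h2 : s2 ≤ e
      · rw [mAbsorb, if_pos h2, pAbsorb, if_pos h2, IH]
      · rw [mAbsorb, if_neg h2, pAbsorb, if_neg h2]

theorem bAbsorb_spec (N : List (Int × Int)) (e tot : Int) :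
    bAbsorb e tot N = ((pAbsorb e N).1, tot + sumlen (pAbsorb e N).2 - sumlen N, (pAbsorb e N).2) := by
  induction N generalizing e tot with
  | nil => simp [bAbsorb, pAbsorb, sumlen]
  | cons p t IH =>
      obtain ⟨s2, e2⟩ := p
      by_cases h2 : s2 ≤ e
      · have hmax : (if e2 > e then e2 else e) = max e e2 := by
          split <;> omega
        rw [bAbsorb, if_pos h2, pAbsorb, if_pos h2, IH, hmax]
        simp [sumlen]
        ring_nf
      · rw [bAbsorb, if_neg h2, pAbsorb, if_neg h2]
        simp [sumlen]

-- B's fused pass computes the coalesced list together with its total length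
theorem foldr_bStep_eq (l : List (Int × Int)) :
    l.foldr (fun x st => bStep st x) (0, []) = (sumlen (mergeR l), mergeR l) := by
  induction l with
  | nil => rfl
  | cons x l IH =>
      rw [List.foldr_cons, IH]
      have hm : mergeR (x :: l) = mAbsorb x.1 x.2 (mergeR l) := rfl
      rw [bStep, bAbsorb_spec, hm, pAbsorb_spec]
      simp [sumlen]
      ring

theorem foldl_sumlen (N : List (Int × Int)) :
    ∀ acc : Int, N.foldl (fun acc p => acc + (p.2 - p.1)) acc = acc + sumlen N := by
  induction N with
  | nil => intro acc; simp [sumlen]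
  | cons p t IH =>
      intro acc
      rw [List.foldl_cons, IH]
      simp only [sumlen, List.foldr_cons]
      ring

-- ===== VERDICT (by name: the statement is the Claim_ definition above) =====
theorem bucket_minutes_after_merge_py_spec : Claim_equal_bucket_minutes_after_merge_py := by
  intro bucket_intervals key seg_s seg_e _
  unfold Spec_bucket_minutes_after_merge_py
  unfold bucket_minutes_after_merge_py bucket_minutes_after_merge_py_alt
  simp only [List.foldl_reverse]
  rw [show ∀ (l : List (Int × Int)), l.foldr (fun x st => bStep st x) (0, []) = (sumlen (mergeR l), mergeR l) from foldr_bStep_eq]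
  rw [foldl_aStep_eq _ [] (by unfold SepIv; exact List.IsChain.nil), foldl_sumlen]
  simp [mergeR]
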